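-- pv_equiv track=rewrite | github.com/zrenjie/DeepLearning | LinearRegression/raw_python.py | dataset_minmax
-- ===== SOURCE A (Python) =====
-- def dataset_minmax(dataset):
--     minmax = []
--     for i in range(len(dataset[0])):
--         column_values = [row[i] for row in dataset]
--         value_min = min(column_values)
--         value_max = max(column_values)
--         minmax.append([value_min, value_max])
--     return minmax
-- ===== SOURCE B (Python) =====
-- def dataset_minmax(dataset):
--     n = len(dataset[0])
--     minmax = [[dataset[0][i], dataset[0][i]] for i in range(n)]
--     for row in dataset[1:]:
--         minmax = [[row[i] if row[i] < minmax[i][0] else minmax[i][0],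
--                    row[i] if row[i] > minmax[i][1] else minmax[i][1]]
--                   for i in range(n)]
--     return minmax
-- ===== Notes on version B (the rewrite author's own statement) =====
-- stated objective: alternative
-- what changed: B makes one row-major pass maintaining running per-column extrema seeded from the first row, instead of materialising each column and calling min/max twice per column.
import Mathlib
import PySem

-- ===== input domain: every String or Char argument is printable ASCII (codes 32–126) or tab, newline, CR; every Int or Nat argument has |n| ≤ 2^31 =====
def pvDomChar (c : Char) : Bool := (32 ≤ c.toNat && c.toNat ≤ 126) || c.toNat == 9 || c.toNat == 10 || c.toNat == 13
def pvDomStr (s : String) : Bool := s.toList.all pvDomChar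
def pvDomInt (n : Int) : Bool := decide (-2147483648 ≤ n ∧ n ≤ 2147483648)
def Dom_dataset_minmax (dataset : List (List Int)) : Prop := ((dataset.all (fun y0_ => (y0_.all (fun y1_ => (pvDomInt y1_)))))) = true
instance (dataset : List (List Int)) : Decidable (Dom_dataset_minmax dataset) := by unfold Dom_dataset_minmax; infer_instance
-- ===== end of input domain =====

-- B replaces A's column-major build-then-reduce (materialise each column, call min and max)
-- by a single row-major pass keeping running per-column extrema seeded from the first row (alternative decomposition, same cost).

-- ===== PORT A =====
-- for i in range(len(dataset[0])): column = [row[i] for row in dataset]; append [min(column), max(column)]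
def dataset_minmax (dataset : List (List Int)) : List (List Int) :=
  (PySem.List.pyRange 0 ((dataset.headD []).length) 1).foldl
    (fun minmax i =>
      let column := dataset.map (fun row => PySem.List.pyGetD row i 0)
      let value_min := (PySem.List.min? column (fun x => x)).getD 0
      let value_max := (PySem.List.max? column (fun x => x)).getD 0
      minmax ++ [[value_min, value_max]]) []

-- ===== PORT B =====
-- seed minmax from dataset[0]; for each later row rebuild minmax with the running compare
def dataset_minmax_alt (dataset : List (List Int)) : List (List Int) :=
  let first := dataset.headD []
  let n := first.length
  let init := (PySem.List.pyRange 0 n 1).map (fun i =>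
      let v := PySem.List.pyGetD first i 0
      [v, v])
  dataset.tail.foldl (fun minmax row =>
    (PySem.List.pyRange 0 n 1).map (fun i =>
      let v := PySem.List.pyGetD row i 0
      let mm := PySem.List.pyGetD minmax i []
      let lo := PySem.List.pyGetD mm 0 0
      let hi := PySem.List.pyGetD mm 1 0
      [if v < lo then v else lo, if v > hi then v else hi])) init

-- ===== PRECONDITION & SPEC =====
-- Pre_ excludes exactly the inputs on which Python A raises IndexError: the empty dataset
-- (dataset[0] fails) and datasets with some row shorter than the first row (row[i] fails).
def Pre_dataset_minmax (dataset : List (List Int)) : Prop :=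
  dataset ≠ [] ∧ ∀ row ∈ dataset, (dataset.headD []).length ≤ row.length
instance (dataset : List (List Int)) : Decidable (Pre_dataset_minmax dataset) := by
  unfold Pre_dataset_minmax; infer_instance

def pvWitness_dataset_minmax : List (List Int) := [[1, 2], [3, 0]]

def Spec_dataset_minmax (dataset : List (List Int)) (out : List (List Int)) : Prop := out = dataset_minmax_alt dataset
instance (dataset : List (List Int)) (out : List (List Int)) : Decidable (Spec_dataset_minmax dataset out) := by unfold Spec_dataset_minmax; infer_instance

-- ===== CLAIM (what is proved, stated in full; the proofs are below) =====
def Claim_equal_dataset_minmax : Prop := ∀ (dataset : List (List Int)), Dom_dataset_minmax dataset → Pre_dataset_minmax dataset → Spec_dataset_minmax dataset (dataset_minmax dataset)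

-- ===== LEMMAS AND PROOFS =====

-- A's append-accumulating foldl is a map
theorem pv_foldl_snoc {α β : Type} (f : α → β) (l : List α) (acc : List β) :
    l.foldl (fun a i => a ++ [f i]) acc = acc ++ l.map f := by
  induction l generalizing acc with
  | nil => simp
  | cons x t ih => simp [List.foldl_cons, ih]

theorem pv_if_min (v lo : Int) : (if v < lo then v else lo) = min lo v := by
  simp [min_def]; split_ifs <;> omega

theorem pv_if_max (v hi : Int) : (if v > hi then v else hi) = max hi v := by
  simp [max_def]; split_ifs <;> omega

-- one B step applied to an accumulator of the shape map-over-range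
theorem pv_step (n : Nat) (row : List Int) (F G : Int → Int) :
    ((PySem.List.pyRange 0 n 1).map (fun i =>
      let v := PySem.List.pyGetD row i 0
      let mm := PySem.List.pyGetD ((PySem.List.pyRange 0 n 1).map (fun j => [F j, G j])) i []
      let lo := PySem.List.pyGetD mm 0 0
      let hi := PySem.List.pyGetD mm 1 0
      [if v < lo then v else lo, if v > hi then v else hi]))
    = (PySem.List.pyRange 0 n 1).map (fun i =>
        [min (F i) (PySem.List.pyGetD row i 0), max (G i) (PySem.List.pyGetD row i 0)]) := by
  apply List.map_congr_left
  intro i hi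
  have hmem := (PySem.List.mem_pyRange_one).mp hi
  have h0 : (0:Int) ≤ i := by omega
  have h1 : i < (n : Int) := by omega
  rw [PySem.List.pyGetD_map_pyRange_of_nonneg _ _ _ _ h0 h1]
  simp only [PySem.List.pyGetD_zero_cons]
  have h2 : PySem.List.pyGetD [F i, G i] 1 0 = G i := by
    simp [PySem.List.pyGetD, PySem.List.pyGet?, PySem.List.pyIdx?]
  rw [h2, pv_if_min, pv_if_max]

-- B's row fold computes per-column running min/max folds
theorem pv_fold (n : Nat) (rows : List (List Int)) (F G : Int → Int) :
    rows.foldl (fun minmax row =>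
      (PySem.List.pyRange 0 n 1).map (fun i =>
        let v := PySem.List.pyGetD row i 0
        let mm := PySem.List.pyGetD minmax i []
        let lo := PySem.List.pyGetD mm 0 0
        let hi := PySem.List.pyGetD mm 1 0
        [if v < lo then v else lo, if v > hi then v else hi]))
      ((PySem.List.pyRange 0 n 1).map (fun i => [F i, G i]))
    = (PySem.List.pyRange 0 n 1).map (fun i =>
        [rows.foldl (fun m row => min m (PySem.List.pyGetD row i 0)) (F i),
         rows.foldl (fun m row => max m (PySem.List.pyGetD row i 0)) (G i)]) := by
  induction rows generalizing F G with
  | nil => rfl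
  | cons r t ih =>
      rw [List.foldl_cons, pv_step n r F G,
        ih (fun i => min (F i) (PySem.List.pyGetD r i 0))
           (fun i => max (G i) (PySem.List.pyGetD r i 0))]
      simp [List.foldl_cons]

theorem pv_main (dataset : List (List Int)) (h : dataset ≠ []) :
    dataset_minmax dataset = dataset_minmax_alt dataset := by
  obtain ⟨d0, rest, rfl⟩ := List.exists_cons_of_ne_nil h
  unfold dataset_minmax dataset_minmax_alt
  simp only [List.headD_cons, List.tail_cons]
  rw [pv_foldl_snoc, pv_fold d0.length rest (fun i => PySem.List.pyGetD d0 i 0)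
        (fun i => PySem.List.pyGetD d0 i 0)]
  simp only [List.nil_append]
  apply List.map_congr_left
  intro i hi
  simp only [List.map_cons, PySem.List.min?_id_cons, PySem.List.max?_id_cons, Option.getD_some]
  rw [List.foldl_map, List.foldl_map]

-- ===== VERDICT (by name: the statement is the Claim_ definition above) =====
theorem dataset_minmax_spec : Claim_equal_dataset_minmax := by
  intro dataset _ hpre
  unfold Spec_dataset_minmax
  exact pv_main dataset hpre.1
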